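-- pv_equiv track=rewrite | github.com/daniel-reich/ubiquitous-fiesta | xzaREqFLW3tZdGnTA_3.py | most_overlapped_block
-- ===== SOURCE A (Python) =====
-- def most_overlapped_block(grid_width, points):
--     grid = [[0 for _ in range(grid_width)] for __ in range(grid_width)]
--     for x, y, dist in points:
--         row = y - 1
--         col = x - 1
--         for r in range(max(0, row-dist), min(grid_width, row+dist+1)):
--             for c in range(max(0, col-dist), min(grid_width, col+dist+1)):
--                 if abs(r - row) + abs(c - col) <= dist:
--                     grid[r][c] += 1
--     return max([max(row) for row in grid])
-- ===== SOURCE B (Python) =====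
-- def most_overlapped_block(grid_width, points):
--     # cell-centric: for each grid cell count the diamonds covering it; no grid array
--     best = 0
--     for r in range(grid_width):
--         for c in range(grid_width):
--             cnt = 0
--             for x, y, dist in points:
--                 if abs(r - (y - 1)) + abs(c - (x - 1)) <= dist:
--                     cnt += 1
--             if cnt > best:
--                 best = cnt
--     return best
-- ===== Notes on version B (the rewrite author's own statement) =====
-- stated objective: alternative
-- what changed: B swaps the loop nesting: instead of allocating a grid and stamping every diamond cell by cell, it iterates over grid cells and counts covering diamonds with one arithmetic test per (cell, point) pair, keeping only a running maximum (no grid storage).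
import Mathlib
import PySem

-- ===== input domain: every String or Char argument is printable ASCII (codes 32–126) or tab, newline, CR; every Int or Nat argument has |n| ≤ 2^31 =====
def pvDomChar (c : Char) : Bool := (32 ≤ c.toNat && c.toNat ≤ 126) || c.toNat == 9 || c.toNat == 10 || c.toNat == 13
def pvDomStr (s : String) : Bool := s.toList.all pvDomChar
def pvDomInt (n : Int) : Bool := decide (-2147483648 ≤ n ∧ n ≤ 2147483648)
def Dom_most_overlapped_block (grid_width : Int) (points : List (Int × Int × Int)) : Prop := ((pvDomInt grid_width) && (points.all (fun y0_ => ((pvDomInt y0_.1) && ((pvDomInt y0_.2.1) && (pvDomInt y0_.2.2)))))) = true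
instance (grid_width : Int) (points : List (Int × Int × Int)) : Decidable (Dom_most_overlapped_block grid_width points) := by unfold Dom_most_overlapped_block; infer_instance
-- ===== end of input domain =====

-- B replaces A's "allocate a grid and stamp each diamond cell by cell" with a cell-centric
-- scan that counts, for each grid cell, the diamonds covering it (one arithmetic test per
-- cell/point pair) while keeping a running maximum; objective: alternative (no grid storage).

-- ===== PORT A =====
def most_overlapped_block (grid_width : Int) (points : List (Int × Int × Int)) : Int :=
  -- grid = [[0]*...]; then for x, y, dist in points: stamp the diamond cell by cell;
  -- finally return max([max(row) for row in grid]).  max() of an empty list raises: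
  -- grid_width ≤ 0 is excluded by Pre_, the .getD 0 is never reached under Pre_
  (PySem.List.max?
    ((points.foldl (fun grid p =>
        (PySem.List.pyRange (max 0 ((p.2.1 - 1) - p.2.2)) (min grid_width ((p.2.1 - 1) + p.2.2 + 1)) 1).foldl
          (fun grid r =>
            (PySem.List.pyRange (max 0 ((p.1 - 1) - p.2.2)) (min grid_width ((p.1 - 1) + p.2.2 + 1)) 1).foldl
              (fun grid c =>
                if |r - (p.2.1 - 1)| + |c - (p.1 - 1)| ≤ p.2.2 then
                  grid.modify r.toNat (fun rowL => rowL.modify c.toNat (· + 1))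
                else grid)
              grid)
          grid)
        ((PySem.List.pyRange 0 grid_width 1).map
          (fun _ => (PySem.List.pyRange 0 grid_width 1).map (fun _ => (0 : Int))))).map
      (fun rowL => (PySem.List.max? rowL (fun v => v)).getD 0))
    (fun v => v)).getD 0

-- ===== PORT B =====
def most_overlapped_block_alt (grid_width : Int) (points : List (Int × Int × Int)) : Int :=
  (PySem.List.pyRange 0 grid_width 1).foldl (fun best r =>
    (PySem.List.pyRange 0 grid_width 1).foldl (fun best c =>
      if best < points.foldl
          (fun cnt p => if |r - (p.2.1 - 1)| + |c - (p.1 - 1)| ≤ p.2.2 then cnt + 1 else cnt) 0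
      then points.foldl
          (fun cnt p => if |r - (p.2.1 - 1)| + |c - (p.1 - 1)| ≤ p.2.2 then cnt + 1 else cnt) 0
      else best) best) 0

-- ===== PRECONDITION & SPEC =====
-- A raises ValueError (max of an empty sequence) when grid_width ≤ 0; those inputs are excluded.
def Pre_most_overlapped_block (grid_width : Int) (points : List (Int × Int × Int)) : Prop :=
  1 ≤ grid_width
instance (grid_width : Int) (points : List (Int × Int × Int)) : Decidable (Pre_most_overlapped_block grid_width points) := by unfold Pre_most_overlapped_block; infer_instance

def pvWitness_most_overlapped_block : Int × (List (Int × Int × Int)) := (3, [(2, 2, 1), (1, 3, 2)])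

def Spec_most_overlapped_block (grid_width : Int) (points : List (Int × Int × Int)) (out : Int) : Prop := out = most_overlapped_block_alt grid_width points
instance (grid_width : Int) (points : List (Int × Int × Int)) (out : Int) : Decidable (Spec_most_overlapped_block grid_width points out) := by unfold Spec_most_overlapped_block; infer_instance

-- ===== CLAIM (what is proved, stated in full; the proofs are below) =====
def Claim_equal_most_overlapped_block : Prop := ∀ (grid_width : Int) (points : List (Int × Int × Int)), Dom_most_overlapped_block grid_width points → Pre_most_overlapped_block grid_width points → Spec_most_overlapped_block grid_width points (most_overlapped_block grid_width points)

-- ===== LEMMAS AND PROOFS =====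

-- number of diamonds of `points` covering the cell (r, c)
def pvCnt : List (Int × Int × Int) → Int → Int → Int
  | [], _, _ => 0
  | p :: ps, r, c =>
      (if |r - (p.2.1 - 1)| + |c - (p.1 - 1)| ≤ p.2.2 then (1 : Int) else 0) + pvCnt ps r c

-- an n × n grid whose (i, j) entry is f i j
def pvTab (n : Int) (f : Int → Int → Int) : List (List Int) :=
  (PySem.List.pyRange 0 n 1).map (fun r => (PySem.List.pyRange 0 n 1).map (fun c => f r c))

-- B's inner counting fold computes pvCnt
lemma pvCnt_from (r c : Int) (points : List (Int × Int × Int)) : ∀ (a : Int),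
    points.foldl
      (fun cnt p => if |r - (p.2.1 - 1)| + |c - (p.1 - 1)| ≤ p.2.2 then cnt + 1 else cnt) a
    = a + pvCnt points r c := by
  induction points with
  | nil => intro a; simp [pvCnt]
  | cons p ps ih =>
    intro a
    rw [List.foldl_cons, ih]
    simp only [pvCnt]
    split_ifs <;> omega

lemma pvCnt_nonneg (points : List (Int × Int × Int)) (r c : Int) : 0 ≤ pvCnt points r c := by
  induction points with
  | nil => simp [pvCnt]
  | cons p ps ih =>
    simp only [pvCnt]
    split_ifs <;> omega

lemma pvTab_congr (n : Int) (f g : Int → Int → Int)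
    (h : ∀ i, 0 ≤ i → i < n → ∀ j, 0 ≤ j → j < n → f i j = g i j) : pvTab n f = pvTab n g := by
  unfold pvTab
  apply List.map_congr_left
  intro r hr
  rw [PySem.List.mem_pyRange_one] at hr
  apply List.map_congr_left
  intro c hc
  rw [PySem.List.mem_pyRange_one] at hc
  exact h r hr.1 hr.2 c hc.1 hc.2

lemma pvModifyMapRange {α : Type} (m : Nat) (g : Nat → α) (i : Nat) (h : α → α) :
    ((List.range m).map g).modify i h
    = (List.range m).map (fun k => if i = k then h (g k) else g k) := by
  apply List.ext_getElem?
  intro j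
  by_cases hj : j < m
  · simp [List.getElem?_modify, List.getElem?_range hj]
  · have h1 : ((List.range m).map g).length ≤ j := by simpa using Nat.le_of_not_lt hj
    have h2 : ((List.range m).map fun k => if i = k then h (g k) else g k).length ≤ j := by
      simpa using Nat.le_of_not_lt hj
    rw [List.getElem?_modify]
    rw [List.getElem?_eq_none h1, List.getElem?_eq_none h2]
    rfl

lemma pvPyRange_zero (n : Int) :
    PySem.List.pyRange 0 n 1 = (List.range n.toNat).map (fun k : Nat => ((k : Nat) : Int)) := by
  rw [PySem.List.pyRange_one]
  simp only [zero_add, sub_zero]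

lemma pvTab_eq_range (n : Int) (f : Int → Int → Int) :
    pvTab n f = (List.range n.toNat).map
      (fun k : Nat => (List.range n.toNat).map (fun j : Nat => f ((k : Nat) : Int) ((j : Nat) : Int))) := by
  unfold pvTab
  rw [pvPyRange_zero, List.map_map]
  apply List.map_congr_left
  intro k _
  simp only [Function.comp_apply]
  rw [List.map_map]
  rfl

lemma pvTab_modify (n : Int) (f : Int → Int → Int) (r c : Int)
    (hr0 : 0 ≤ r) (hrn : r < n) (hc0 : 0 ≤ c) (hcn : c < n) :
    (pvTab n f).modify r.toNat (fun rowL => rowL.modify c.toNat (· + 1))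
    = pvTab n (fun i j => if i = r ∧ j = c then f i j + 1 else f i j) := by
  rw [pvTab_eq_range, pvTab_eq_range]
  rw [pvModifyMapRange]
  apply List.map_congr_left
  intro k hk
  rw [List.mem_range] at hk
  by_cases hkr : r.toNat = k
  · have hkr' : (k : Int) = r := by omega
    rw [if_pos hkr, pvModifyMapRange]
    apply List.map_congr_left
    intro j hj
    rw [List.mem_range] at hj
    by_cases hjc : c.toNat = j
    · have : (j : Int) = c := by omega
      simp [hjc, hkr', this]
    · have : ¬ ((j : Int) = c) := by omega
      simp [hjc, hkr', this]
  · have hkr' : ¬ ((k : Int) = r) := by omega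
    rw [if_neg hkr]
    apply List.map_congr_left
    intro j hj
    simp [hkr']

lemma pvFoldC (n row col dist r : Int) (hr0 : 0 ≤ r) (hrn : r < n)
    (cs : List Int) (hcs : ∀ c ∈ cs, 0 ≤ c ∧ c < n) (hnd : cs.Nodup) :
    ∀ (f : Int → Int → Int),
    cs.foldl (fun g c =>
        if |r - row| + |c - col| ≤ dist then
          g.modify r.toNat (fun rowL => rowL.modify c.toNat (· + 1))
        else g) (pvTab n f)
    = pvTab n (fun i j =>
        if i = r ∧ j ∈ cs ∧ |i - row| + |j - col| ≤ dist then f i j + 1 else f i j) := by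
  induction cs with
  | nil =>
    intro f
    simp only [List.foldl_nil]
    apply pvTab_congr
    intro i _ _ j _ _
    simp
  | cons c cs ih =>
    intro f
    obtain ⟨hc0, hcn⟩ := hcs c (List.mem_cons_self ..)
    have hnotin : c ∉ cs := (List.nodup_cons.mp hnd).1
    have hstep : (if |r - row| + |c - col| ≤ dist then
          (pvTab n f).modify r.toNat (fun rowL => rowL.modify c.toNat (· + 1))
        else pvTab n f)
        = pvTab n (fun i j =>
            if i = r ∧ j = c ∧ |i - row| + |j - col| ≤ dist then f i j + 1 else f i j) := by
      by_cases hcond : |r - row| + |c - col| ≤ dist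
      · rw [if_pos hcond, pvTab_modify n f r c hr0 hrn hc0 hcn]
        apply pvTab_congr
        intro i _ _ j _ _
        by_cases hij : i = r ∧ j = c
        · obtain ⟨h1, h2⟩ := hij
          subst h1; subst h2
          rw [if_pos ⟨rfl, rfl⟩, if_pos ⟨rfl, rfl, hcond⟩]
        · rw [if_neg hij, if_neg (fun h => hij ⟨h.1, h.2.1⟩)]
      · rw [if_neg hcond]
        apply pvTab_congr
        intro i _ _ j _ _
        by_cases hij : i = r ∧ j = c
        · obtain ⟨h1, h2⟩ := hij
          subst h1; subst h2
          rw [if_neg]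
          rintro ⟨-, -, h3⟩
          exact hcond h3
        · rw [if_neg (fun h => hij ⟨h.1, h.2.1⟩)]
    rw [List.foldl_cons, hstep,
        ih (fun x hx => hcs x (List.mem_cons_of_mem _ hx)) (List.nodup_cons.mp hnd).2]
    apply pvTab_congr
    intro i _ _ j _ _
    by_cases hic : i = r
    · subst hic
      by_cases hjc : j = c
      · subst hjc
        have hjn : j ∉ cs := hnotin
        by_cases hcond : |i - row| + |j - col| ≤ dist <;>
          simp [hjn, hcond, List.mem_cons]
      · by_cases hjm : j ∈ cs <;>
          by_cases hcond : |i - row| + |j - col| ≤ dist <;>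
          simp [hjc, hjm, hcond, List.mem_cons]
    · simp [hic]

lemma pvFoldR (n row col dist : Int)
    (rs : List Int) (hrs : ∀ r ∈ rs, 0 ≤ r ∧ r < n) (hnd : rs.Nodup)
    (cs : List Int) (hcs : ∀ c ∈ cs, 0 ≤ c ∧ c < n) (hcnd : cs.Nodup) :
    ∀ (f : Int → Int → Int),
    rs.foldl (fun g r =>
        cs.foldl (fun g c =>
          if |r - row| + |c - col| ≤ dist then
            g.modify r.toNat (fun rowL => rowL.modify c.toNat (· + 1))
          else g) g) (pvTab n f)
    = pvTab n (fun i j =>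
        if i ∈ rs ∧ j ∈ cs ∧ |i - row| + |j - col| ≤ dist then f i j + 1 else f i j) := by
  induction rs with
  | nil =>
    intro f
    simp only [List.foldl_nil]
    apply pvTab_congr
    intro i _ _ j _ _
    simp
  | cons r rs ih =>
    intro f
    obtain ⟨hr0, hrn⟩ := hrs r (List.mem_cons_self ..)
    have hnotin : r ∉ rs := (List.nodup_cons.mp hnd).1
    rw [List.foldl_cons, pvFoldC n row col dist r hr0 hrn cs hcs hcnd f,
        ih (fun x hx => hrs x (List.mem_cons_of_mem _ hx)) (List.nodup_cons.mp hnd).2]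
    apply pvTab_congr
    intro i _ _ j _ _
    by_cases hic : i = r
    · subst hic
      have hin : i ∉ rs := hnotin
      by_cases hjm : j ∈ cs <;>
        by_cases hcond : |i - row| + |j - col| ≤ dist <;>
        simp [hin, hjm, hcond, List.mem_cons]
    · by_cases him : i ∈ rs <;>
        by_cases hjm : j ∈ cs <;>
        by_cases hcond : |i - row| + |j - col| ≤ dist <;>
        simp [hic, him, hjm, hcond, List.mem_cons]

lemma pvStamp (n : Int) (p : Int × Int × Int) (f : Int → Int → Int) :
    (PySem.List.pyRange (max 0 ((p.2.1 - 1) - p.2.2)) (min n ((p.2.1 - 1) + p.2.2 + 1)) 1).foldl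
      (fun g r =>
        (PySem.List.pyRange (max 0 ((p.1 - 1) - p.2.2)) (min n ((p.1 - 1) + p.2.2 + 1)) 1).foldl
          (fun g c =>
            if |r - (p.2.1 - 1)| + |c - (p.1 - 1)| ≤ p.2.2 then
              g.modify r.toNat (fun rowL => rowL.modify c.toNat (· + 1))
            else g) g) (pvTab n f)
    = pvTab n (fun i j =>
        if |i - (p.2.1 - 1)| + |j - (p.1 - 1)| ≤ p.2.2 then f i j + 1 else f i j) := by
  rw [pvFoldR n (p.2.1 - 1) (p.1 - 1) p.2.2 _
      (by intro r hr; rw [PySem.List.mem_pyRange_one] at hr; omega)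
      (PySem.List.nodup_pyRange_one _ _) _
      (by intro c hc; rw [PySem.List.mem_pyRange_one] at hc; omega)
      (PySem.List.nodup_pyRange_one _ _) f]
  apply pvTab_congr
  intro i hi0 hin j hj0 hjn
  have hiff : (i ∈ PySem.List.pyRange (max 0 ((p.2.1 - 1) - p.2.2)) (min n ((p.2.1 - 1) + p.2.2 + 1)) 1 ∧
      j ∈ PySem.List.pyRange (max 0 ((p.1 - 1) - p.2.2)) (min n ((p.1 - 1) + p.2.2 + 1)) 1 ∧
      |i - (p.2.1 - 1)| + |j - (p.1 - 1)| ≤ p.2.2)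
      ↔ |i - (p.2.1 - 1)| + |j - (p.1 - 1)| ≤ p.2.2 := by
    simp only [PySem.List.mem_pyRange_one, Int.abs_eq_natAbs]
    omega
  rw [if_congr hiff rfl rfl]

lemma pvGridEq (n : Int) (points : List (Int × Int × Int)) :
    ∀ (f : Int → Int → Int),
    points.foldl (fun grid p =>
      (PySem.List.pyRange (max 0 ((p.2.1 - 1) - p.2.2)) (min n ((p.2.1 - 1) + p.2.2 + 1)) 1).foldl
        (fun grid r =>
          (PySem.List.pyRange (max 0 ((p.1 - 1) - p.2.2)) (min n ((p.1 - 1) + p.2.2 + 1)) 1).foldl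
            (fun grid c =>
              if |r - (p.2.1 - 1)| + |c - (p.1 - 1)| ≤ p.2.2 then
                grid.modify r.toNat (fun rowL => rowL.modify c.toNat (· + 1))
              else grid)
            grid)
        grid) (pvTab n f)
    = pvTab n (fun i j => f i j + pvCnt points i j) := by
  induction points with
  | nil =>
    intro f
    simp only [List.foldl_nil]
    apply pvTab_congr
    intro i _ _ j _ _
    simp [pvCnt]
  | cons p ps ih =>
    intro f
    rw [List.foldl_cons, pvStamp n p f, ih]
    apply pvTab_congr
    intro i _ _ j _ _
    rw [show pvCnt (p :: ps) i j
        = (if |i - (p.2.1 - 1)| + |j - (p.1 - 1)| ≤ p.2.2 then (1 : Int) else 0)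
          + pvCnt ps i j from rfl]
    split_ifs <;> omega

lemma pvIteMax (b x : Int) : (if b < x then x else b) = max b x := by
  rcases le_total b x with h | h <;> simp [max_def] <;> omega

lemma pvFoldlMaxShift (l : List Int) : ∀ (b x : Int),
    l.foldl max (max b x) = max b (l.foldl max x) := by
  induction l with
  | nil => intro b x; simp
  | cons y l ih =>
    intro b x
    simp only [List.foldl_cons]
    rw [max_assoc, ih]

-- ===== VERDICT (by name: the statement is the Claim_ definition above) =====
theorem most_overlapped_block_spec : Claim_equal_most_overlapped_block := by
  intro gw points _ hpre
  unfold Spec_most_overlapped_block most_overlapped_block most_overlapped_block_alt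
  have hpre' : (0 : Int) < gw := hpre
  -- characterize A's grid
  have hgrid0 : ((PySem.List.pyRange 0 gw 1).map
      (fun _ => (PySem.List.pyRange 0 gw 1).map (fun _ => (0 : Int))))
      = pvTab gw (fun _ _ => 0) := rfl
  rw [hgrid0, pvGridEq gw points (fun _ _ => 0)]
  have hF : pvTab gw (fun i j => (fun _ _ => (0:Int)) i j + pvCnt points i j)
      = pvTab gw (fun i j => pvCnt points i j) := by
    apply pvTab_congr; intro i _ _ j _ _; simp
  rw [hF]
  -- split the range 0 :: rest
  have hcons : PySem.List.pyRange 0 gw 1 = 0 :: PySem.List.pyRange 1 gw 1 := by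
    have := PySem.List.pyRange_one_cons (a := 0) (b := gw) hpre'
    simpa using this
  set F : Int → Int → Int := fun i j => pvCnt points i j with hFdef
  set R' : List Int := PySem.List.pyRange 1 gw 1 with hR'
  -- row maxima
  have hrowmax : ∀ r : Int,
      (PySem.List.max? ((PySem.List.pyRange 0 gw 1).map (F r)) (fun v => v)).getD 0
      = (R'.map (F r)).foldl max (F r 0) := by
    intro r
    rw [hcons, List.map_cons, PySem.List.max?_id_cons]
    rfl
  -- A's value
  have hA : (PySem.List.max? ((pvTab gw F).map
        (fun rowL => (PySem.List.max? rowL (fun v => v)).getD 0)) (fun v => v)).getD 0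
      = (R'.map (fun r => (R'.map (F r)).foldl max (F r 0))).foldl max
          ((R'.map (F 0)).foldl max (F 0 0)) := by
    unfold pvTab
    rw [List.map_map]
    have hmaps : ((PySem.List.pyRange 0 gw 1).map
        ((fun rowL => (PySem.List.max? rowL (fun v => v)).getD 0) ∘
          fun r => (PySem.List.pyRange 0 gw 1).map (F r)))
        = (PySem.List.pyRange 0 gw 1).map (fun r => (R'.map (F r)).foldl max (F r 0)) := by
      apply List.map_congr_left
      intro r _
      exact hrowmax r
    rw [hmaps, hcons, List.map_cons, PySem.List.max?_id_cons]
    rfl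
  rw [hA]
  -- B's value
  have hinner : ∀ (b r : Int),
      (PySem.List.pyRange 0 gw 1).foldl (fun best c =>
        if best < points.foldl
            (fun cnt p => if |r - (p.2.1 - 1)| + |c - (p.1 - 1)| ≤ p.2.2 then cnt + 1 else cnt) 0
        then points.foldl
            (fun cnt p => if |r - (p.2.1 - 1)| + |c - (p.1 - 1)| ≤ p.2.2 then cnt + 1 else cnt) 0
        else best) b
      = max b ((R'.map (F r)).foldl max (F r 0)) := by
    intro b r
    have hfun : (fun (best c : Int) =>
        if best < points.foldl
            (fun cnt p => if |r - (p.2.1 - 1)| + |c - (p.1 - 1)| ≤ p.2.2 then cnt + 1 else cnt) 0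
        then points.foldl
            (fun cnt p => if |r - (p.2.1 - 1)| + |c - (p.1 - 1)| ≤ p.2.2 then cnt + 1 else cnt) 0
        else best) = fun best c => max best (F r c) := by
      funext best c
      rw [show points.foldl
          (fun cnt p => if |r - (p.2.1 - 1)| + |c - (p.1 - 1)| ≤ p.2.2 then cnt + 1 else cnt) 0
          = F r c by rw [pvCnt_from r c points 0]; simp [hFdef]]
      exact pvIteMax best (F r c)
    rw [hfun, ← List.foldl_map (f := F r) (g := max), hcons, List.map_cons, List.foldl_cons,
        pvFoldlMaxShift]
  have houter : (PySem.List.pyRange 0 gw 1).foldl (fun best r =>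
        (PySem.List.pyRange 0 gw 1).foldl (fun best c =>
          if best < points.foldl
              (fun cnt p => if |r - (p.2.1 - 1)| + |c - (p.1 - 1)| ≤ p.2.2 then cnt + 1 else cnt) 0
          then points.foldl
              (fun cnt p => if |r - (p.2.1 - 1)| + |c - (p.1 - 1)| ≤ p.2.2 then cnt + 1 else cnt) 0
          else best) best) 0
      = max 0 ((R'.map (fun r => (R'.map (F r)).foldl max (F r 0))).foldl max
          ((R'.map (F 0)).foldl max (F 0 0))) := by
    have hfun2 : (fun (best r : Int) =>
        (PySem.List.pyRange 0 gw 1).foldl (fun best c =>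
          if best < points.foldl
              (fun cnt p => if |r - (p.2.1 - 1)| + |c - (p.1 - 1)| ≤ p.2.2 then cnt + 1 else cnt) 0
          then points.foldl
              (fun cnt p => if |r - (p.2.1 - 1)| + |c - (p.1 - 1)| ≤ p.2.2 then cnt + 1 else cnt) 0
          else best) best)
        = fun best r => max best ((R'.map (F r)).foldl max (F r 0)) := by
      funext best r
      exact hinner best r
    rw [hfun2, ← List.foldl_map (f := fun r => (R'.map (F r)).foldl max (F r 0)) (g := max),
        hcons, List.map_cons, List.foldl_cons, pvFoldlMaxShift]
  rw [houter]
  -- the running maximum is nonnegative, so the extra max 0 is absorbed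
  have h1 : (0:Int) ≤ F 0 0 := pvCnt_nonneg points 0 0
  have h2 : F 0 0 ≤ (R'.map (F 0)).foldl max (F 0 0) := (PySem.List.le_foldl_max _ _).1
  have h3 : (R'.map (F 0)).foldl max (F 0 0)
      ≤ (R'.map (fun r => (R'.map (F r)).foldl max (F r 0))).foldl max
          ((R'.map (F 0)).foldl max (F 0 0)) := (PySem.List.le_foldl_max _ _).1
  omega
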